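-- pv_equiv track=rewrite | github.com/Iruze/SolutionsOnLeetcodeForZZW | 34_FindFirstAndLastPositionofElementInSortedArray/searchRange.py | _posLR
-- ===== SOURCE A (Python) =====
-- def _posLR(nums, target, isLeft):
--     # 注意： right = len(nums)
--     left, right = 0, len(nums)
--     while left < right:
--         mid = left + ((right - left) >> 1)
--         # 1. target < nums[mid]
--         # 2. 左寻找，且target == nums[mid]，此时当做target < nums[mid]，
--         #    这样才能向left左边靠拢
--         if target < nums[mid] or isLeft and target == nums[mid]:
--             right = mid
--         else:
--             left = mid + 1
--     return left
-- ===== SOURCE B (Python) =====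
-- def _posLR(nums, target, isLeft):
--     # Recursive binary search on list slices carrying an offset,
--     # instead of A's index-pair while loop over the whole array.
--     def go(off, xs):
--         if not xs:
--             return off
--         m = len(xs) >> 1
--         if target < xs[m] or (isLeft and target == xs[m]):
--             return go(off, xs[:m])
--         return go(off + m + 1, xs[m+1:])
--     return go(0, nums)
-- ===== Notes on version B (the rewrite author's own statement) =====
-- stated objective: alternative
-- what changed: A's while loop over an index pair (left,right) on the whole array is replaced by a recursive binary search over list slices carrying an offset (recurse on xs[:m] or, with offset shifted, on xs[m+1:]).
import Mathlib
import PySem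

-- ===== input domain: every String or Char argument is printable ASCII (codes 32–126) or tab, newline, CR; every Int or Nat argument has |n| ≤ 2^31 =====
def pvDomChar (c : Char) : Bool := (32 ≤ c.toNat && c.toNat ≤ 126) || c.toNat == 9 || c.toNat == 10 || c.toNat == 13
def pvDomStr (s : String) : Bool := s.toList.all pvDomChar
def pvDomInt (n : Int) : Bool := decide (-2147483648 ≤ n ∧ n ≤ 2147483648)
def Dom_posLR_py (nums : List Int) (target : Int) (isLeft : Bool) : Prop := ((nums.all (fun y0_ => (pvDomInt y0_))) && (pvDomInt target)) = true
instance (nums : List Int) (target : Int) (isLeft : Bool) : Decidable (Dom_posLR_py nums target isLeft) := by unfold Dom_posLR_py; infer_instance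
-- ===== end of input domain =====

-- ===== PORT A =====
-- B changes the decomposition only (slice recursion vs index-pair loop); same objective, not faster.
-- A's while loop: recursion on the pair (left, right), decreasing right - left.
def posLRGo (nums : List Int) (target : Int) (isLeft : Bool) (left right : Nat) : Nat :=
  if left < right then
    let mid := left + (right - left) / 2
    match nums[mid]? with
    | none => left   -- unreachable totality guard: mid < right ≤ nums.length throughout
    | some v =>
      if target < v ∨ (isLeft ∧ target = v) then posLRGo nums target isLeft left mid
      else posLRGo nums target isLeft (mid + 1) right
  else left
termination_by right - left
decreasing_by all_goals omega

def posLR_py (nums : List Int) (target : Int) (isLeft : Bool) : Int :=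
  (posLRGo nums target isLeft 0 nums.length : Int)

-- ===== PORT B =====
def posLRAltGo (target : Int) (isLeft : Bool) (off : Nat) (xs : List Int) : Nat :=
  if xs.isEmpty then off
  else
    let m := xs.length / 2
    match xs[m]? with
    | none => off   -- unreachable totality guard: m < xs.length for nonempty xs
    | some v =>
      if target < v ∨ (isLeft ∧ target = v) then posLRAltGo target isLeft off (xs.take m)
      else posLRAltGo target isLeft (off + m + 1) (xs.drop (m + 1))
termination_by xs.length
decreasing_by
  all_goals cases xs with
  | nil => simp at *
  | cons a l => simp [List.length_take] <;> omega

def posLR_py_alt (nums : List Int) (target : Int) (isLeft : Bool) : Int :=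
  (posLRAltGo target isLeft 0 nums : Int)

-- ===== PRECONDITION & SPEC =====
def Spec_posLR_py (nums : List Int) (target : Int) (isLeft : Bool) (out : Int) : Prop := out = posLR_py_alt nums target isLeft
instance (nums : List Int) (target : Int) (isLeft : Bool) (out : Int) : Decidable (Spec_posLR_py nums target isLeft out) := by unfold Spec_posLR_py; infer_instance

-- ===== CLAIM (what is proved, stated in full; the proofs are below) =====
def Claim_equal_posLR_py : Prop := ∀ (nums : List Int) (target : Int) (isLeft : Bool), Dom_posLR_py nums target isLeft → Spec_posLR_py nums target isLeft (posLR_py nums target isLeft)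

-- ===== LEMMAS AND PROOFS =====

-- ===== VERDICT (by name: the statement is the Claim_ definition above) =====
-- Key lemma: the loop on [left, right) computes B's recursion on the slice (nums.drop left).take (right - left), offset left.
theorem go_eq_alt (nums : List Int) (target : Int) (isLeft : Bool) :
    ∀ n left right, right - left = n → right ≤ nums.length →
    posLRGo nums target isLeft left right = posLRAltGo target isLeft left ((nums.drop left).take (right - left)) := by
  intro n
  induction n using Nat.strong_induction_on with
  | _ n ih =>
    intro left right hn hlen
    rw [posLRGo, posLRAltGo]
    by_cases h : left < right
    · have hseglen : ((nums.drop left).take (right - left)).length = right - left := by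
        simp [List.length_take, List.length_drop]; omega
      have hne : ((nums.drop left).take (right - left)).isEmpty = false := by
        rw [List.isEmpty_eq_false_iff, ← List.length_pos_iff, hseglen]; omega
      rw [if_pos h, if_neg (by simp [hne])]
      simp only [hseglen]
      set m := (right - left) / 2 with hm
      have hmlt : m < right - left := by omega
      have hidx : ((nums.drop left).take (right - left))[m]? = nums[left + m]? := by
        rw [List.getElem?_take_of_lt hmlt, List.getElem?_drop]
      rw [hidx]
      cases hv : nums[left + m]? with
      | none =>
        rfl
      | some v =>
        dsimp only
        by_cases hc : target < v ∨ (isLeft = true ∧ target = v)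
        · rw [if_pos hc, if_pos hc]
          have := ih m (by omega) left (left + m) (by omega) (by omega)
          rw [this]
          congr 1
          rw [List.take_take]
          congr 1
          omega
        · rw [if_neg hc, if_neg hc]
          have := ih (right - left - (m + 1)) (by omega) (left + m + 1) right (by omega) hlen
          rw [this]
          congr 1
          rw [List.drop_take, List.drop_drop]
          congr 1
          omega
    · rw [if_neg h]
      have : right - left = 0 := by omega
      rw [this, List.take_zero]
      unfold posLRAltGo
      simp

theorem posLR_py_spec : Claim_equal_posLR_py := by
  intro nums target isLeft _
  unfold Spec_posLR_py posLR_py posLR_py_alt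
  rw [go_eq_alt nums target isLeft (nums.length - 0) 0 nums.length rfl le_rfl]
  simp
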